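-- pv_equiv track=rewrite | github.com/MarcosEduard0/Top_Esp_Programacao | aula5/b.py | Solve
-- ===== SOURCE A (Python) =====
-- def GetPrimes(n):
--     x = 2
--     primes = dict()
--     while n > 1:
--         if n % x == 0:
--             primes[x] = primes.get(x, 0) + 1
--             n //= x
--         elif n < x * x:
--             primes[n] = primes.get(n, 0) + 1
--             break
--         else:
--             x += 1
--     return primes
--
-- def Solve(k, cs):
--     pps = set([pr**pw for pr, pw in GetPrimes(k).items()])
--     for c in cs:
--         for_del = set()
--         for pp in pps:
--             if c % pp == 0:
--                 for_del.add(pp)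
--         for pp in for_del:
--             pps.remove(pp)
--     return len(pps) == 0
-- ===== SOURCE B (Python) =====
-- def _gcd(a, b):
--     while b:
--         a, b = b, a % b
--     return a
--
-- def Solve(k, cs):
--     # No factorization at all: k's maximal prime powers all divide some element
--     # iff k divides the lcm of the gcd(c, k), i.e. that lcm equals k.
--     if k <= 1:
--         return True
--     L = 1
--     for c in cs:
--         g = _gcd(c, k)
--         L = L * g // _gcd(L, g)
--     return L == k
-- ===== Notes on version B (the rewrite author's own statement) =====
-- stated objective: alternative
-- what changed: B never factors k and keeps no set of prime powers: it folds over cs accumulating L = lcm of gcd(c, k) via the Euclidean algorithm and returns L == k, which holds exactly when every maximal prime power of k divides some element (empty cs and k<=1 agree with A).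
import Mathlib
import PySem

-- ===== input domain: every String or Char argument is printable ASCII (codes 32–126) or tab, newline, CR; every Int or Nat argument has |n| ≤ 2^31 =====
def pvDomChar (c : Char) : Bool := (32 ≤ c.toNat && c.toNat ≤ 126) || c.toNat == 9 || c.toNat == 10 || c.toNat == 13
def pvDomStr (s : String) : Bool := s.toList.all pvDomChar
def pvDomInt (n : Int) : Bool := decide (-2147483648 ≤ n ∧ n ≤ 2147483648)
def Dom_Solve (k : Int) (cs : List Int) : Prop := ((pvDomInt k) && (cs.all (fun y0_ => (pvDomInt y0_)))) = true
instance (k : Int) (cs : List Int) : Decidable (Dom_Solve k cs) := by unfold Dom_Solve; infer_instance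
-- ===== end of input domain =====

-- B drops A's factorization of k, its exponent dict and its mutable prime-power set entirely:
-- it folds the Euclidean gcd/lcm over cs (L = lcm of gcd(c, k)) and answers L == k.

-- ===== PORT A =====
-- A's GetPrimes while-loop, structurally recursive on a fuel bound that dominates the
-- loop's step count; the `1 < n ∧ 2 ≤ x` test is the loop condition plus the always-true
-- fact x ≥ 2 (A enters with x = 2 and x never decreases), added only for totality.
def gpAF : Nat → Int → Int → PySem.Dict Int Int → PySem.Dict Int Int
  | 0, _, _, d => d
  | fuel + 1, n, x, d =>
    if _h : 1 < n ∧ 2 ≤ x then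
      if PySem.Int.mod n x == 0 then
        gpAF fuel (PySem.Int.floordiv n x) x (d.insert x (d.getD x 0 + 1))
      else if n < x * x then
        d.insert n (d.getD n 0 + 1)
      else
        gpAF fuel n (x + 1) d
    else d

def GetPrimes (n : Int) : PySem.Dict Int Int :=
  gpAF (n.toNat ^ 2 + (n - 2).toNat + 1) n 2 PySem.Dict.empty

def Solve (k : Int) (cs : List Int) : Bool :=
  let pps0 : PySem.Set Int :=
    PySem.Set.ofList (((GetPrimes k).items).map (fun pe => pe.1 ^ pe.2.toNat))
  -- pps.remove(pp) never raises here (pp comes from for_del ⊆ pps); total form via remove?.getD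
  let final := cs.foldl (fun (pps : PySem.Set Int) c =>
      let for_del : PySem.Set Int :=
        pps.foldl (fun fd pp => if PySem.Int.mod c pp == 0 then PySem.Set.add fd pp else fd)
          PySem.Set.empty
      for_del.foldl (fun ps pp => (PySem.Set.remove? ps pp).getD ps) pps) pps0
  PySem.Set.len final == 0

-- ===== PORT B =====
-- B's helper _gcd: `while b: a, b = b, a % b; return a` — recursion on the loop test b ≠ 0;
-- Python's floor mod shrinks |b| strictly, which is the termination measure.
def pgcd (a b : Int) : Int :=
  if h : b ≠ 0 then pgcd b (PySem.Int.mod a b) else a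
termination_by b.natAbs
decreasing_by
  rcases lt_or_gt_of_ne h with hb | hb
  · have h1 := (PySem.Int.mod_neg_bounds (a := a) hb).1
    have h2 := (PySem.Int.mod_neg_bounds (a := a) hb).2
    omega
  · have h1 := PySem.Int.mod_nonneg (a := a) hb
    have h2 := PySem.Int.mod_lt (a := a) hb
    omega

def Solve_alt (k : Int) (cs : List Int) : Bool :=
  if k ≤ 1 then true
  else
    (cs.foldl (fun L c =>
      let g := pgcd c k
      PySem.Int.floordiv (L * g) (pgcd L g)) 1) == k

-- ===== PRECONDITION & SPEC =====
def Spec_Solve (k : Int) (cs : List Int) (out : Bool) : Prop := out = Solve_alt k cs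
instance (k : Int) (cs : List Int) (out : Bool) : Decidable (Spec_Solve k cs out) := by unfold Spec_Solve; infer_instance

-- ===== CLAIM (what is proved, stated in full; the proofs are below) =====
def Claim_equal_Solve : Prop := ∀ (k : Int) (cs : List Int), Dom_Solve k cs → Spec_Solve k cs (Solve k cs)

-- ===== LEMMAS AND PROOFS =====

-- arithmetic fact used by the termination proofs of the proof-side loops
theorem pv_div_shrink {n x : Int} (hdvd : x ∣ n) (hn : 1 ≤ n) (hx : 2 ≤ x) :
    1 ≤ n / x ∧ n / x < n := by
  have hmul : n / x * x = n := Int.ediv_mul_cancel hdvd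
  have h1 : 1 ≤ n / x := by nlinarith
  exact ⟨h1, by nlinarith⟩

-- proof-side well-founded (fuel-free) version of A's loop
def gpA (n x : Int) (d : PySem.Dict Int Int) : PySem.Dict Int Int :=
  if h : 1 < n ∧ 2 ≤ x then
    if PySem.Int.mod n x == 0 then
      gpA (PySem.Int.floordiv n x) x (d.insert x (d.getD x 0 + 1))
    else if n < x * x then
      d.insert n (d.getD n 0 + 1)
    else
      gpA n (x + 1) d
  else d
termination_by (n.toNat, (n - x).toNat)
decreasing_by
  · have hdvd : x ∣ n := (PySem.Int.mod_eq_zero_iff_dvd n x).mp (by simpa using ‹PySem.Int.mod n x == 0›)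
    have hx : (2:Int) ≤ x := h.2
    have _hn : (1:Int) < n := h.1
    have h1 : PySem.Int.floordiv n x = n / x := PySem.Int.floordiv_eq_ediv_of_pos (by omega)
    have h2 := pv_div_shrink hdvd (by omega) hx
    left; omega
  · have hx : (2:Int) ≤ x := h.2
    have hnx : x * x ≤ n := by omega
    have hxn : x < n := by nlinarith
    right; omega

-- proof-side: extract the full power of x in one go (B has no such loop; proof device only)
def pullB (n x pp : Int) : Int × Int :=
  if h : PySem.Int.mod n x == 0 ∧ 1 ≤ n ∧ 2 ≤ x then
    pullB (PySem.Int.floordiv n x) x (pp * x)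
  else (pp, n)
termination_by n.toNat
decreasing_by
  have hdvd : x ∣ n := (PySem.Int.mod_eq_zero_iff_dvd n x).mp (by simpa using h.1)
  have h1 : PySem.Int.floordiv n x = n / x := PySem.Int.floordiv_eq_ediv_of_pos (by omega)
  have h2 := pv_div_shrink hdvd h.2.1 h.2.2
  omega

-- bound on the remaining cofactor, needed for fbB's termination
theorem pullB_snd_le (n x pp : Int) : (pullB n x pp).2 ≤ n := by
  refine pullB.induct x (fun n pp => (pullB n x pp).2 ≤ n) ?_ ?_ n pp
  · intro n pp h ih
    rw [pullB, dif_pos h]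
    have hdvd : x ∣ n := (PySem.Int.mod_eq_zero_iff_dvd n x).mp (by simpa using h.1)
    have h1 : PySem.Int.floordiv n x = n / x := PySem.Int.floordiv_eq_ediv_of_pos (by omega)
    have h2 := pv_div_shrink hdvd h.2.1 h.2.2
    omega
  · intro n pp h
    rw [pullB, dif_neg h]

-- proof-side list of the maximal prime powers of n that A's dict encodes
def fbB (n x : Int) : List Int :=
  if h : 1 < n ∧ 2 ≤ x then
    if hm : PySem.Int.mod n x == 0 then
      (pullB n x 1).1 :: fbB (pullB n x 1).2 x
    else if n < x * x then [n]
    else fbB n (x + 1)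
  else []
termination_by (n.toNat, (n - x).toNat)
decreasing_by
  · have hdvd : x ∣ n := (PySem.Int.mod_eq_zero_iff_dvd n x).mp (by simpa using hm)
    have hx : (2:Int) ≤ x := h.2
    have _hn : (1:Int) < n := h.1
    have h1 : PySem.Int.floordiv n x = n / x := PySem.Int.floordiv_eq_ediv_of_pos (by omega)
    have h2 := pv_div_shrink hdvd (by omega) hx
    have h4 : (pullB n x 1).2 ≤ n / x := by
      rw [pullB, dif_pos ⟨hm, by omega, hx⟩]
      have := pullB_snd_le (PySem.Int.floordiv n x) x (1 * x)
      omega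
    left; omega
  · have hx : (2:Int) ≤ x := h.2
    have hnx : x * x ≤ n := by omega
    have hxn : x < n := by nlinarith
    right; omega

-- multiplicity of x in n and remaining cofactor, mirroring pullB's recursion (proof-side only)
def pvMul (n x : Int) : Nat :=
  if h : PySem.Int.mod n x == 0 ∧ 1 ≤ n ∧ 2 ≤ x then pvMul (PySem.Int.floordiv n x) x + 1 else 0
termination_by n.toNat
decreasing_by
  have hdvd : x ∣ n := (PySem.Int.mod_eq_zero_iff_dvd n x).mp (by simpa using h.1)
  have h1 : PySem.Int.floordiv n x = n / x := PySem.Int.floordiv_eq_ediv_of_pos (by omega)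
  have h2 := pv_div_shrink hdvd h.2.1 h.2.2
  omega

def pvRem (n x : Int) : Int :=
  if h : PySem.Int.mod n x == 0 ∧ 1 ≤ n ∧ 2 ≤ x then pvRem (PySem.Int.floordiv n x) x else n
termination_by n.toNat
decreasing_by
  have hdvd : x ∣ n := (PySem.Int.mod_eq_zero_iff_dvd n x).mp (by simpa using h.1)
  have h1 : PySem.Int.floordiv n x = n / x := PySem.Int.floordiv_eq_ediv_of_pos (by omega)
  have h2 := pv_div_shrink hdvd h.2.1 h.2.2
  omega

theorem pullB_eq (n x pp : Int) : pullB n x pp = (pp * x ^ pvMul n x, pvRem n x) := by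
  refine pullB.induct x (fun n pp => pullB n x pp = (pp * x ^ pvMul n x, pvRem n x)) ?_ ?_ n pp
  · intro n pp h ih
    conv_rhs => rw [pvMul, dif_pos h, pvRem, dif_pos h]
    rw [pullB, dif_pos h, ih, pow_succ]
    simp only [Prod.mk.injEq]
    exact ⟨by ring, trivial⟩
  · intro n pp h
    rw [pullB, dif_neg h, pvMul, dif_neg h, pvRem, dif_neg h]
    simp

theorem pvRem_spec (n x : Int) (hn : 1 ≤ n) (hx : 2 ≤ x) :
    1 ≤ pvRem n x ∧ pvRem n x * x ^ pvMul n x = n ∧ ¬ PySem.Int.mod (pvRem n x) x = 0 := by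
  refine pullB.induct x
    (fun n _ => 1 ≤ n → (1 ≤ pvRem n x ∧ pvRem n x * x ^ pvMul n x = n ∧
      ¬ PySem.Int.mod (pvRem n x) x = 0)) ?_ ?_ n 0 hn
  · intro n pp h ih _
    have hdvd : x ∣ n := (PySem.Int.mod_eq_zero_iff_dvd n x).mp (by simpa using h.1)
    have h1 : PySem.Int.floordiv n x = n / x := PySem.Int.floordiv_eq_ediv_of_pos (by omega)
    have h2 := pv_div_shrink hdvd h.2.1 h.2.2
    have hmul : n / x * x = n := Int.ediv_mul_cancel hdvd
    obtain ⟨ha, hb, hc⟩ := ih (by omega)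
    rw [pvRem, dif_pos h, pvMul, dif_pos h]
    refine ⟨ha, ?_, hc⟩
    rw [pow_succ, ← mul_assoc, hb, h1, hmul]
  · intro n pp h hn1
    rw [pvRem, dif_neg h, pvMul, dif_neg h]
    have hm : ¬ PySem.Int.mod n x = 0 := by
      intro hm0; exact h ⟨by simp [hm0], hn1, hx⟩
    simpa using ⟨hn1, hm⟩

-- A's repeated single divisions by x collapse to one dict update by the full multiplicity
theorem gpA_step (n x : Int) (hx : 2 ≤ x) :
    ∀ (a : Int) (d : PySem.Dict Int Int), 1 ≤ n →
      gpA n x (d.insert x a) = gpA (pvRem n x) x (d.insert x (a + (pvMul n x : Int))) := by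
  refine pullB.induct x
    (fun n _ => ∀ (a : Int) (d : PySem.Dict Int Int), 1 ≤ n →
      gpA n x (d.insert x a) = gpA (pvRem n x) x (d.insert x (a + (pvMul n x : Int)))) ?_ ?_ n 0
  · intro n pp h ih a d _
    have hdvd : x ∣ n := (PySem.Int.mod_eq_zero_iff_dvd n x).mp (by simpa using h.1)
    have hxn : x ≤ n := Int.le_of_dvd (by omega) hdvd
    have h1 : PySem.Int.floordiv n x = n / x := PySem.Int.floordiv_eq_ediv_of_pos (by omega)
    have h2 := pv_div_shrink hdvd h.2.1 h.2.2
    conv_rhs => rw [pvRem, dif_pos h, pvMul, dif_pos h]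
    rw [gpA, dif_pos ⟨by omega, hx⟩, if_pos h.1]
    rw [PySem.Dict.getD_insert_self, PySem.Dict.insert_insert_self]
    rw [ih (a + 1) d (by omega)]
    congr 2
    push_cast
    ring
  · intro n pp h a d _
    rw [pvRem, dif_neg h, pvMul, dif_neg h]
    norm_num

-- the key factorization lemma: A's dict of exponents maps (in order) to the prime-power list
theorem pv_main : ∀ (m : Nat) (n x : Int) (d : PySem.Dict Int Int),
    n.toNat ^ 2 + (n - x).toNat ≤ m → 1 ≤ n → 2 ≤ x →
    (∀ p ∈ d.keys, ¬ PySem.Int.mod n p = 0) →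
    (gpA n x d).items.map (fun pe => pe.1 ^ pe.2.toNat)
      = d.items.map (fun pe => pe.1 ^ pe.2.toNat) ++ fbB n x := by
  intro m
  induction m with
  | zero =>
    intro n x d hm hn _ _
    have : 1 ≤ n.toNat := by omega
    have : 1 ≤ n.toNat ^ 2 := Nat.one_le_pow _ _ (by omega)
    omega
  | succ m ih =>
    intro n x d hm hn hx hkeys
    by_cases hn1 : 1 < n
    · by_cases hmod : PySem.Int.mod n x = 0
      · -- divisible: collapse A's repeated divisions, compare with the pulled power
        have hdvd : x ∣ n := (PySem.Int.mod_eq_zero_iff_dvd n x).mp hmod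
        have hxn : x ≤ n := Int.le_of_dvd (by omega) hdvd
        have hfd : PySem.Int.floordiv n x = n / x := PySem.Int.floordiv_eq_ediv_of_pos (by omega)
        have hq := pv_div_shrink hdvd (by omega) hx
        have hqmul : n / x * x = n := Int.ediv_mul_cancel hdvd
        have hxk : x ∉ d.keys := fun hk => hkeys x hk hmod
        have hcont : d.contains x = false := by
          cases hc : d.contains x with
          | false => rfl
          | true => exact absurd ((PySem.Dict.contains_iff_mem_keys d x).mp hc) hxk
        obtain ⟨hr1, hrmul, hrmod⟩ := pvRem_spec (n / x) x (by omega) hx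
        have hrq : pvRem (n / x) x ∣ n / x := ⟨_, hrmul.symm⟩
        have hrn : pvRem (n / x) x ∣ n := hrq.trans ⟨x, hqmul.symm⟩
        have hr_le_q : pvRem (n / x) x ≤ n / x := Int.le_of_dvd (by omega) hrq
        have hkeys' : ∀ p ∈ (d.insert x (0 + 1 + (pvMul (n / x) x : Int))).keys,
            ¬ PySem.Int.mod (pvRem (n / x) x) p = 0 := by
          intro p hp hmp
          rcases (PySem.Dict.mem_keys_insert d x p _).mp hp with hpx | hpd
          · exact hrmod (by rwa [hpx] at hmp)
          · exact hkeys p hpd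
              ((PySem.Int.mod_eq_zero_iff_dvd n p).mpr
                (((PySem.Int.mod_eq_zero_iff_dvd (pvRem (n / x) x) p).mp hmp).trans hrn))
        have hmeas : (pvRem (n / x) x).toNat ^ 2 + (pvRem (n / x) x - x).toNat ≤ m := by
          have h2q : 2 * (n / x) ≤ n := by nlinarith
          have hb : (pvRem (n / x) x).toNat + 1 ≤ n.toNat := by omega
          have : (pvRem (n / x) x).toNat ^ 2 + (pvRem (n / x) x).toNat + 1 ≤ n.toNat ^ 2 := by
            nlinarith
          omega
        have hmB : pvMul n x = pvMul (n / x) x + 1 := by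
          rw [pvMul, dif_pos ⟨(by simpa using hmod), by omega, hx⟩, hfd]
        have hrB : pvRem n x = pvRem (n / x) x := by
          rw [pvRem, dif_pos ⟨(by simpa using hmod), by omega, hx⟩, hfd]
        rw [gpA, dif_pos ⟨hn1, hx⟩, if_pos (by simpa using hmod : (PySem.Int.mod n x == 0) = true),
          PySem.Dict.getD_of_not_contains d 0 hcont, hfd,
          gpA_step (n / x) x hx (0 + 1) d (by omega),
          ih (pvRem (n / x) x) x _ hmeas hr1 hx hkeys',
          PySem.Dict.items_insert_of_not_contains d _ hcont]
        conv_rhs => rw [fbB]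
        rw [dif_pos ⟨hn1, hx⟩,
          dif_pos (by simpa using hmod : (PySem.Int.mod n x == 0) = true), pullB_eq, hmB, hrB]
        simp only [List.map_append, List.map_cons, List.map_nil, List.append_assoc,
          List.cons_append, List.nil_append, one_mul]
        have hexp : ((0 : Int) + 1 + (pvMul (n / x) x : Int)).toNat = pvMul (n / x) x + 1 := by
          omega
        rw [hexp]
      · by_cases hlt : n < x * x
        · have hnk : n ∉ d.keys := by
            intro hk
            exact hkeys n hk ((PySem.Int.mod_eq_zero_iff_dvd n n).mpr dvd_rfl)
          have hcont : d.contains n = false := by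
            cases hc : d.contains n with
            | false => rfl
            | true => exact absurd ((PySem.Dict.contains_iff_mem_keys d n).mp hc) hnk
          rw [gpA, dif_pos ⟨hn1, hx⟩, if_neg (by simpa using hmod), if_pos hlt,
            PySem.Dict.getD_of_not_contains d 0 hcont,
            PySem.Dict.items_insert_of_not_contains d _ hcont]
          rw [fbB, dif_pos ⟨hn1, hx⟩, dif_neg (by simpa using hmod), if_pos hlt]
          simp
        · have hxx : x * x ≤ n := by omega
          have hxn : x < n := by nlinarith
          rw [gpA, dif_pos ⟨hn1, hx⟩, if_neg (by simpa using hmod), if_neg hlt]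
          rw [fbB, dif_pos ⟨hn1, hx⟩, dif_neg (by simpa using hmod), if_neg hlt]
          exact ih n (x + 1) d (by omega) hn (by omega) hkeys
    · have hn1' : n = 1 := by omega
      rw [gpA, dif_neg (by omega), fbB, dif_neg (by omega)]
      simp

theorem pv_listeq (k : Int) :
    ((gpA k 2 PySem.Dict.empty).items).map (fun pe => pe.1 ^ pe.2.toNat) = fbB k 2 := by
  by_cases hk : 1 ≤ k
  · have h := pv_main (k.toNat ^ 2 + (k - 2).toNat) k 2 PySem.Dict.empty le_rfl hk (by norm_num)
      (by intro p hp; simp [PySem.Dict.keys, PySem.Dict.empty] at hp)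
    simpa [PySem.Dict.empty] using h
  · rw [gpA, dif_neg (by omega), fbB, dif_neg (by omega)]
    rfl

theorem pv_meas_lt {n r x : Int} (hx : 0 ≤ x) (hn : 1 < n) (hr0 : 1 ≤ r) (h2r : 2 * r ≤ n) :
    r.toNat ^ 2 + (r - x).toNat < n.toNat ^ 2 + (n - x).toNat := by
  have hb : r.toNat + 1 ≤ n.toNat := by omega
  have h1 : (r - x).toNat ≤ r.toNat := by omega
  have h2 : r.toNat ^ 2 + r.toNat + 1 ≤ n.toNat ^ 2 := by nlinarith
  have h3 : r.toNat ^ 2 + (r - x).toNat < n.toNat ^ 2 := by omega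
  exact Nat.lt_of_lt_of_le h3 (Nat.le_add_right _ _)

theorem gpAF_eq : ∀ (fuel : Nat) (n x : Int) (d : PySem.Dict Int Int),
    n.toNat ^ 2 + (n - x).toNat < fuel → gpAF fuel n x d = gpA n x d := by
  intro fuel
  induction fuel with
  | zero => intro n x d h; omega
  | succ f ih =>
    intro n x d h
    rw [gpA]
    show (if _h : 1 < n ∧ 2 ≤ x then _ else d) = _
    by_cases hg : 1 < n ∧ 2 ≤ x
    · rw [dif_pos hg, dif_pos hg]
      by_cases hm : (PySem.Int.mod n x == 0) = true
      · rw [if_pos hm, if_pos hm]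
        have hdvd : x ∣ n := (PySem.Int.mod_eq_zero_iff_dvd n x).mp (by simpa using hm)
        have h1 : PySem.Int.floordiv n x = n / x := PySem.Int.floordiv_eq_ediv_of_pos (by omega)
        have h2 := pv_div_shrink hdvd (by omega) hg.2
        have hq : n / x * x = n := Int.ediv_mul_cancel hdvd
        have h2q : 2 * (n / x) ≤ n := by nlinarith
        have hml := pv_meas_lt (x := x) (by omega) hg.1 h2.1 h2q
        rw [h1]
        exact ih _ x _ (by omega)
      · rw [if_neg hm, if_neg hm]
        by_cases hlt : n < x * x
        · rw [if_pos hlt, if_pos hlt]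
        · rw [if_neg hlt, if_neg hlt]
          have hxx : x * x ≤ n := by omega
          have hxn : x < n := by nlinarith [hg.2]
          exact ih n (x + 1) d (by omega)
    · rw [dif_neg hg, dif_neg hg]

-- the delete step `pps.remove(pp)` (total form) is a filter
theorem pv_remove_getD (s : PySem.Set Int) (x : Int) :
    (PySem.Set.remove? s x).getD s = s.filter (fun y => !(y == x)) := by
  by_cases h : x ∈ s
  · rw [PySem.Set.remove?_of_mem h]
    rfl
  · have : PySem.Set.remove? s x = none := (PySem.Set.remove?_eq_none_iff s x).mpr h
    rw [this]
    show s = _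
    rw [eq_comm, List.filter_eq_self]
    intro a ha
    simp only [Bool.not_eq_eq_eq_not, Bool.not_true]
    exact beq_eq_false_iff_ne.mpr (fun hax => h (hax ▸ ha))

-- the whole remove-phase over a worklist is one filter
theorem pv_removefold (ys : List Int) :
    ∀ (s : List Int),
      ys.foldl (fun ps pp => (PySem.Set.remove? ps pp).getD ps) s
        = s.filter (fun v => !ys.contains v) := by
  induction ys with
  | nil => intro s; simp
  | cons y ys ihy =>
    intro s
    rw [List.foldl_cons, pv_remove_getD, ihy, List.filter_filter]
    apply List.filter_congr
    intro v _
    simp only [List.contains_cons, Bool.not_or]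
    exact Bool.and_comm _ _

-- one element's pass: collect-then-delete equals a single filter
theorem pv_step (c : Int) (s : List Int) :
    (s.foldl (fun fd pp => if PySem.Int.mod c pp == 0 then PySem.Set.add fd pp else fd)
        PySem.Set.empty).foldl (fun ps pp => (PySem.Set.remove? ps pp).getD ps) s
      = s.filter (fun pp => !(PySem.Int.mod c pp == 0)) := by
  have hford : s.foldl (fun fd pp => if PySem.Int.mod c pp == 0 then PySem.Set.add fd pp else fd)
      PySem.Set.empty = PySem.Set.ofList (s.filter (fun pp => PySem.Int.mod c pp == 0)) := by
    rw [PySem.List.foldl_if_eq_foldl_filter, PySem.Set.ofList_eq_foldl]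
    rfl
  rw [hford, pv_removefold]
  apply List.filter_congr
  intro v hv
  congr 1
  have hmem : v ∈ PySem.Set.ofList (s.filter (fun pp => PySem.Int.mod c pp == 0))
      ↔ (PySem.Int.mod c v == 0) = true := by
    rw [PySem.Set.mem_ofList, List.mem_filter]
    exact ⟨fun h => h.2, fun h => ⟨hv, h⟩⟩
  rw [Bool.eq_iff_iff, List.contains_iff_mem]
  exact hmem

-- the loop over cs filters out every prime power some element is divisible by
theorem pv_loop (cs : List Int) :
    ∀ (s : List Int),
      cs.foldl (fun (pps : PySem.Set Int) c =>
          let for_del : PySem.Set Int :=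
            pps.foldl (fun fd pp => if PySem.Int.mod c pp == 0 then PySem.Set.add fd pp else fd)
              PySem.Set.empty
          for_del.foldl (fun ps pp => (PySem.Set.remove? ps pp).getD ps) pps) s
        = s.filter (fun pp => !(cs.any (fun c => PySem.Int.mod c pp == 0))) := by
  induction cs with
  | nil => intro s; simp
  | cons c cs ihc =>
    intro s
    rw [List.foldl_cons]
    show (cs.foldl _ ((s.foldl _ PySem.Set.empty).foldl _ s)) = _
    rw [pv_step, ihc, List.filter_filter]
    apply List.filter_congr
    intro v _
    simp [Bool.and_comm]

-- A returns true iff every listed prime power divides some element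
theorem Solve_iff (k : Int) (cs : List Int) :
    Solve k cs = true ↔ ∀ pp ∈ fbB k 2, ∃ c ∈ cs, pp ∣ c := by
  simp only [Solve, GetPrimes]
  rw [gpAF_eq _ k 2 _ (by omega), pv_listeq, pv_loop]
  simp only [PySem.Set.len, beq_iff_eq, Nat.cast_eq_zero, List.length_eq_zero_iff,
    List.filter_eq_nil_iff, PySem.Set.mem_ofList, Bool.not_eq_true', Bool.not_eq_false,
    List.any_eq_true, beq_iff_eq, PySem.Int.mod_eq_zero_iff_dvd]

-- ===== B-side: the Euclidean helper computes Int.gcd =====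
theorem pgcd_eq_aux : ∀ (m : Nat) (b : Int), b.natAbs ≤ m → 0 < b → ∀ a : Int,
    pgcd a b = (Int.gcd a b : Int) := by
  intro m
  induction m with
  | zero => intro b hbm hb a; omega
  | succ m ih =>
    intro b hbm hb a
    rw [pgcd, dif_pos (by omega : b ≠ 0), PySem.Int.mod_eq_emod_of_pos hb]
    have hr0 : 0 ≤ a % b := Int.emod_nonneg a (by omega)
    have hrb : a % b < b := Int.emod_lt_of_pos a hb
    by_cases hr : a % b = 0
    · rw [hr, pgcd, dif_neg (by omega : ¬ ((0:Int) ≠ 0))]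
      have hdvd : b ∣ a := Int.dvd_of_emod_eq_zero hr
      rw [Int.gcd_eq_natAbs_right_iff_dvd.mpr hdvd]
      omega
    · rw [ih (a % b) (by omega) (by omega) b]
      congr 1
      rw [Int.emod_def]
      rw [Int.gcd_sub_mul_left_right b a (a / b), Int.gcd_comm]

theorem pgcd_eq (b : Int) (hb : 0 < b) (a : Int) : pgcd a b = (Int.gcd a b : Int) :=
  pgcd_eq_aux b.natAbs b le_rfl hb a

-- structural spec of the prime-power list: product, coprimality, prime powers dividing n
theorem fbB_spec : ∀ (n x : Int), 1 ≤ n → 2 ≤ x →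
    (∀ y : Int, 2 ≤ y → y < x → ¬ y ∣ n) →
    (((fbB n x).map Int.natAbs).prod = n.natAbs ∧
     ((fbB n x).map Int.natAbs).Pairwise Nat.Coprime ∧
     ∀ q ∈ (fbB n x).map Int.natAbs, (∃ p e, Nat.Prime p ∧ 0 < e ∧ q = p ^ e) ∧ (q : Int) ∣ n) := by
  intro n x
  refine fbB.induct
    (motive := fun n x => 1 ≤ n → 2 ≤ x →
      (∀ y : Int, 2 ≤ y → y < x → ¬ y ∣ n) →
      (((fbB n x).map Int.natAbs).prod = n.natAbs ∧
       ((fbB n x).map Int.natAbs).Pairwise Nat.Coprime ∧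
       ∀ q ∈ (fbB n x).map Int.natAbs, (∃ p e, Nat.Prime p ∧ 0 < e ∧ q = p ^ e) ∧ (q : Int) ∣ n))
    ?_ ?_ ?_ ?_ n x
  · -- divisible branch
    intro n x h hm ih hn1 hx hinv
    have hxd : x ∣ n := (PySem.Int.mod_eq_zero_iff_dvd n x).mp (by simpa using hm)
    obtain ⟨hr1, hrmul, hrmod⟩ := pvRem_spec n x (by omega) hx
    have hxrem : ¬ x ∣ pvRem n x := fun hd =>
      hrmod ((PySem.Int.mod_eq_zero_iff_dvd _ x).mpr hd)
    have he1 : 1 ≤ pvMul n x := by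
      rw [pvMul, dif_pos ⟨hm, by omega, hx⟩]
      omega
    have hremdvd : pvRem n x ∣ n := ⟨x ^ pvMul n x, hrmul.symm⟩
    -- x.natAbs is prime: it is the least divisor ≥ 2 of n
    have hxp : x.natAbs.Prime := by
      rw [Nat.prime_def_lt]
      refine ⟨by omega, fun m hmlt hmd => ?_⟩
      by_contra hm1
      have hm0 : m ≠ 0 := by
        rintro rfl
        simp only [Nat.zero_dvd] at hmd
        omega
      have hm2 : 2 ≤ m := by omega
      have hmdx : (m : Int) ∣ x := Int.ofNat_dvd_left.mpr hmd
      exact hinv (m : Int) (by omega) (by omega) (hmdx.trans hxd)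
    have hinv' : ∀ y : Int, 2 ≤ y → y < x → ¬ y ∣ pvRem n x := fun y h2 hyx hd =>
      hinv y h2 hyx (hd.trans hremdvd)
    have ih' := ih
    rw [pullB_eq] at ih'
    obtain ⟨ihp, ihw, ihe⟩ := ih' hr1 hx hinv'
    rw [fbB, dif_pos h, dif_pos hm, pullB_eq]
    simp only [one_mul, List.map_cons, List.prod_cons, List.pairwise_cons, List.mem_cons]
    have hposx : (0:Int) < x := by omega
    have hxe_pos : (0:Int) < x ^ pvMul n x := pow_pos hposx _
    have habs_pow : (x ^ pvMul n x).natAbs = x.natAbs ^ pvMul n x := Int.natAbs_pow x _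
    have hcop : ∀ q ∈ (fbB (pvRem n x) x).map Int.natAbs,
        Nat.Coprime ((x ^ pvMul n x).natAbs) q := by
      intro q hq
      obtain ⟨_, hqdvd⟩ := ihe q hq
      rw [habs_pow]
      refine Nat.Coprime.pow_left _ ((Nat.Prime.coprime_iff_not_dvd hxp).mpr ?_)
      intro hxq
      have h1 : (q : Int) ∣ pvRem n x := hqdvd
      have h2 : x.natAbs ∣ (pvRem n x).natAbs :=
        hxq.trans (Int.ofNat_dvd_left.mp h1)
      exact hxrem (Int.natAbs_dvd_natAbs.mp h2)
    refine ⟨?_, ⟨hcop, ihw⟩, ?_⟩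
    · rw [ihp, habs_pow]
      have : n.natAbs = (pvRem n x).natAbs * (x ^ pvMul n x).natAbs := by
        rw [← Int.natAbs_mul, hrmul]
      rw [this, habs_pow]
      ring
    · rintro q (rfl | hq)
      · refine ⟨⟨x.natAbs, pvMul n x, hxp, by omega, habs_pow⟩, ?_⟩
        rw [Int.natAbs_dvd]
        exact ⟨pvRem n x, by linarith [hrmul]⟩
      · obtain ⟨hpp, hqd⟩ := ihe q hq
        exact ⟨hpp, hqd.trans hremdvd⟩
  · -- elif branch: n itself is prime
    intro n x h hm hlt hn1 hx hinv
    have hxn : ¬ x ∣ n := fun hd => by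
      have := (PySem.Int.mod_eq_zero_iff_dvd n x).mpr hd
      simp [this] at hm
    have hm2 : 2 ≤ n.natAbs := by omega
    have hprime : n.natAbs.Prime := by
      set p := n.natAbs.minFac with hpdef
      have hp : p.Prime := Nat.minFac_prime (by omega)
      have hpd : p ∣ n.natAbs := Nat.minFac_dvd _
      have hpx : x.natAbs ≤ p := by
        by_contra hlt2
        have hp2 : 2 ≤ p := hp.two_le
        have : (p : Int) ∣ n := Int.ofNat_dvd_left.mpr hpd
        exact hinv (p : Int) (by omega) (by omega) this
      by_cases hq1 : n.natAbs / p = 1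
      · have hnp : n.natAbs = p := by
          have h9 := Nat.mul_div_cancel' hpd
          rw [hq1, mul_one] at h9
          omega
        rw [hnp]
        exact hp
      · exfalso
        have hq0 : 0 < n.natAbs / p :=
          Nat.div_pos (Nat.le_of_dvd (by omega) hpd) hp.pos
        have hqd : n.natAbs / p ∣ n.natAbs := Nat.div_dvd_of_dvd hpd
        have hple : p ≤ n.natAbs / p := by
          have h5 : (n.natAbs / p).minFac ∣ n.natAbs := (Nat.minFac_dvd _).trans hqd
          have h7 := Nat.minFac_le_of_dvd (Nat.minFac_prime hq1).two_le h5
          have h8 := Nat.minFac_le hq0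
          omega
        have hnm : n.natAbs = p * (n.natAbs / p) := (Nat.mul_div_cancel' hpd).symm
        have habs : n.natAbs < x.natAbs * x.natAbs := by
          have hna : (n.natAbs : Int) = n := Int.natAbs_of_nonneg (by omega)
          have hxa : (x.natAbs : Int) = x := Int.natAbs_of_nonneg (by omega)
          have : ((n.natAbs : Int)) < (x.natAbs : Int) * (x.natAbs : Int) := by
            rw [hna, hxa]; exact hlt
          exact_mod_cast this
        have hA : x.natAbs * x.natAbs ≤ p * p := Nat.mul_le_mul hpx hpx
        have hB : p * p ≤ p * (n.natAbs / p) := Nat.mul_le_mul_left p hple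
        omega
    rw [fbB, dif_pos h, dif_neg hm, if_pos hlt]
    refine ⟨by simp, by simp, ?_⟩
    intro q hq
    simp only [List.map_cons, List.map_nil, List.mem_singleton] at hq
    subst hq
    exact ⟨⟨n.natAbs, 1, hprime, one_pos, (pow_one _).symm⟩, Int.natAbs_dvd.mpr dvd_rfl⟩
  · -- x += 1 branch
    intro n x h hm hlt ih hn1 hx hinv
    rw [fbB, dif_pos h, dif_neg hm, if_neg hlt]
    refine ih hn1 (by omega) ?_
    intro y h2 hyx hd
    by_cases hy : y = x
    · subst hy
      exact (fun hdd => by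
        have := (PySem.Int.mod_eq_zero_iff_dvd n y).mpr hdd
        simp [this] at hm) hd
    · exact hinv y h2 (by omega) hd
  · -- loop finished: n = 1
    intro n x h hn1 hx _
    have : n = 1 := by
      by_contra hne
      exact h ⟨by omega, hx⟩
    subst this
    rw [fbB, dif_neg h]
    simp

-- prime powers split over lcm
theorem pp_dvd_lcm {p : Nat} (hp : p.Prime) (e a b : Nat) (ha : a ≠ 0) (hb : b ≠ 0) :
    p ^ e ∣ Nat.lcm a b ↔ p ^ e ∣ a ∨ p ^ e ∣ b := by
  have hl : Nat.lcm a b ≠ 0 := Nat.lcm_ne_zero ha hb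
  rw [Nat.Prime.pow_dvd_iff_le_factorization hp hl,
    Nat.Prime.pow_dvd_iff_le_factorization hp ha,
    Nat.Prime.pow_dvd_iff_le_factorization hp hb,
    Nat.factorization_lcm ha hb, Finsupp.sup_apply]
  exact le_sup_iff

-- ===== the gcd/lcm fold =====
def natFold (k' : Nat) (cs : List Int) (a : Nat) : Nat :=
  cs.foldl (fun L c => Nat.lcm L (Int.gcd c (k' : Int))) a

theorem natFold_dvd (k' : Nat) (cs : List Int) : ∀ a : Nat, a ∣ k' → natFold k' cs a ∣ k' := by
  induction cs with
  | nil => intro a ha; exact ha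
  | cons c cs ih =>
    intro a ha
    exact ih _ (Nat.lcm_dvd ha (Int.gcd_dvd_natAbs_right ..))

theorem natFold_ne_zero (k' : Nat) (hk : k' ≠ 0) (cs : List Int) :
    ∀ a : Nat, a ≠ 0 → natFold k' cs a ≠ 0 := by
  induction cs with
  | nil => intro a ha; exact ha
  | cons c cs ih =>
    intro a ha
    exact ih _ (Nat.lcm_ne_zero ha (by simp [Int.gcd_eq_zero_iff, Int.natCast_eq_zero, hk]))

theorem natFold_mono (k' : Nat) (cs : List Int) : ∀ a : Nat, a ∣ natFold k' cs a := by
  induction cs with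
  | nil => intro a; exact dvd_rfl
  | cons c cs ih =>
    intro a
    exact (Nat.dvd_lcm_left _ _).trans (ih _)

theorem gcd_dvd_natFold (k' : Nat) (cs : List Int) :
    ∀ a : Nat, ∀ c ∈ cs, Int.gcd c (k' : Int) ∣ natFold k' cs a := by
  induction cs with
  | nil => intro a c hc; simp at hc
  | cons c0 cs ih =>
    intro a c hc
    rcases List.mem_cons.mp hc with rfl | hc
    · exact (Nat.dvd_lcm_right _ _).trans (natFold_mono k' cs _)
    · exact ih _ c hc

theorem pp_dvd_natFold {p : Nat} (hp : p.Prime) (e : Nat) (k' : Nat) (hk : k' ≠ 0) (cs : List Int) :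
    ∀ a : Nat, a ≠ 0 →
      (p ^ e ∣ natFold k' cs a ↔ p ^ e ∣ a ∨ ∃ c ∈ cs, p ^ e ∣ Int.gcd c (k' : Int)) := by
  induction cs with
  | nil => intro a ha; simp [natFold]
  | cons c cs ih =>
    intro a ha
    have hg : Int.gcd c (k' : Int) ≠ 0 := by simp [Int.gcd_eq_zero_iff, Int.natCast_eq_zero, hk]
    have : natFold k' (c :: cs) a = natFold k' cs (Nat.lcm a (Int.gcd c (k' : Int))) := rfl
    rw [this, ih _ (Nat.lcm_ne_zero ha hg), pp_dvd_lcm hp e a _ ha hg]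
    constructor
    · rintro ((h | h) | h)
      · exact Or.inl h
      · exact Or.inr ⟨c, List.mem_cons_self .., h⟩
      · obtain ⟨c', hc', h⟩ := h
        exact Or.inr ⟨c', List.mem_cons_of_mem _ hc', h⟩
    · rintro (h | ⟨c', hc', h⟩)
      · exact Or.inl (Or.inl h)
      · rcases List.mem_cons.mp hc' with rfl | hc'
        · exact Or.inl (Or.inr h)
        · exact Or.inr ⟨c', hc', h⟩

-- pairwise-coprime divisors multiply into a common divisor
theorem coprime_prod_dvd : ∀ (l : List Nat), l.Pairwise Nat.Coprime →
    ∀ L : Nat, (∀ q ∈ l, q ∣ L) → l.prod ∣ L := by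
  intro l
  induction l with
  | nil => intro _ L _; simp
  | cons q l ih =>
    intro hpw L hd
    rw [List.pairwise_cons] at hpw
    have hcp : Nat.Coprime q l.prod :=
      Nat.coprime_list_prod_right_iff.mpr hpw.1
    rw [List.prod_cons]
    exact Nat.Coprime.mul_dvd_of_dvd_of_dvd hcp (hd q (List.mem_cons_self ..))
      (ih hpw.2 L (fun q' hq' => hd q' (List.mem_cons_of_mem _ hq')))

-- B's Int fold equals the Nat fold
theorem foldB_eq (k : Int) (hk : 2 ≤ k) (cs : List Int) : ∀ a : Nat, 1 ≤ a →
    cs.foldl (fun L c =>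
      let g := pgcd c k
      PySem.Int.floordiv (L * g) (pgcd L g)) (a : Int) = ((natFold k.natAbs cs a : Nat) : Int) := by
  induction cs with
  | nil => intro a _; rfl
  | cons c cs ih =>
    intro a ha
    have hkk : ((k.natAbs : Nat) : Int) = k := by omega
    have hg0 : 0 < Int.gcd c k := Int.gcd_pos_of_ne_zero_right c (by omega)
    have hstep : (let g := pgcd c k
        PySem.Int.floordiv ((a : Int) * g) (pgcd (a : Int) g))
        = ((Nat.lcm a (Int.gcd c (k.natAbs : Int)) : Nat) : Int) := by
      show PySem.Int.floordiv ((a : Int) * pgcd c k) (pgcd (a : Int) (pgcd c k))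
        = ((Nat.lcm a (Int.gcd c (k.natAbs : Int)) : Nat) : Int)
      rw [pgcd_eq k (by omega) c]
      rw [pgcd_eq (Int.gcd c k : Int) (by exact_mod_cast hg0) (a : Int),
        Int.gcd_natCast_natCast]
      have hcast : ((a : Int) * (Int.gcd c k : Int)) = ((a * Int.gcd c k : Nat) : Int) := by
        push_cast; ring
      rw [hcast, PySem.Int.floordiv_natCast, hkk]
      rfl
    rw [List.foldl_cons, hstep]
    have hnat : natFold k.natAbs (c :: cs) a
        = natFold k.natAbs cs (Nat.lcm a (Int.gcd c (k.natAbs : Int))) := rfl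
    rw [hnat]
    have hg2 : 0 < Int.gcd c (k.natAbs : Int) :=
      Int.gcd_pos_of_ne_zero_right c (by omega)
    exact ih _ (Nat.one_le_iff_ne_zero.mpr (Nat.lcm_ne_zero (by omega) (by omega)))

-- the central equivalence for k ≥ 2
theorem pv_key (k : Int) (hk : 2 ≤ k) (cs : List Int) :
    ((∀ pp ∈ fbB k 2, ∃ c ∈ cs, pp ∣ c) ↔ natFold k.natAbs cs 1 = k.natAbs) := by
  obtain ⟨hprod, hpw, helts⟩ := fbB_spec k 2 (by omega) (by omega) (fun y h1 h2 => by omega)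
  have hkne : k.natAbs ≠ 0 := by omega
  have hLdvd : natFold k.natAbs cs 1 ∣ k.natAbs := natFold_dvd _ cs 1 (one_dvd _)
  have hLne : natFold k.natAbs cs 1 ≠ 0 := natFold_ne_zero _ hkne cs 1 one_ne_zero
  have hgcd_eq : ∀ c : Int, Int.gcd c (k.natAbs : Int) = Nat.gcd c.natAbs k.natAbs := by
    intro c
    simp [Int.gcd, Int.natAbs_abs]
  constructor
  · intro h
    refine Nat.dvd_antisymm hLdvd ?_
    have hmain : (List.map Int.natAbs (fbB k 2)).prod ∣ natFold k.natAbs cs 1 := by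
      refine coprime_prod_dvd _ hpw _ ?_
      intro q hq
      obtain ⟨pp, hpp, rfl⟩ := List.mem_map.mp hq
      obtain ⟨c, hc, hcd⟩ := h pp hpp
      obtain ⟨_, hdk⟩ := helts pp.natAbs (List.mem_map_of_mem hpp)
      have h1 : pp.natAbs ∣ c.natAbs := Int.natAbs_dvd_natAbs.mpr hcd
      have h2 : pp.natAbs ∣ k.natAbs := Int.ofNat_dvd_left.mp hdk
      have h3 : pp.natAbs ∣ Int.gcd c (k.natAbs : Int) := by
        rw [hgcd_eq]
        exact Nat.dvd_gcd h1 h2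
      exact h3.trans (gcd_dvd_natFold k.natAbs cs 1 c hc)
    rwa [hprod] at hmain
  · intro hL pp hpp
    obtain ⟨⟨pr, e, hpr, he, hqe⟩, hdk⟩ := helts pp.natAbs (List.mem_map_of_mem hpp)
    have h1 : pp.natAbs ∣ natFold k.natAbs cs 1 := by
      rw [hL]
      exact Int.ofNat_dvd_left.mp hdk
    rw [hqe] at h1
    rcases (pp_dvd_natFold hpr e k.natAbs hkne cs 1 one_ne_zero).mp h1 with h2 | ⟨c, hc, h2⟩
    · have : pr ^ e ≤ 1 := Nat.le_of_dvd one_pos h2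
      have : 1 < pr ^ e := Nat.one_lt_pow (by omega) hpr.one_lt
      omega
    · refine ⟨c, hc, ?_⟩
      have h3 : pp.natAbs ∣ c.natAbs := by
        rw [hqe]
        refine h2.trans ?_
        rw [hgcd_eq]
        exact Nat.gcd_dvd_left _ _
      exact Int.natAbs_dvd_natAbs.mp h3

-- ===== VERDICT (by name: the statement is the Claim_ definition above) =====
theorem Solve_spec : Claim_equal_Solve := by
  unfold Claim_equal_Solve
  intro k cs _
  unfold Spec_Solve
  by_cases hk : k ≤ 1
  · have hA : Solve k cs = true := by
      rw [Solve_iff]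
      intro pp hpp
      rw [fbB, dif_neg (by omega)] at hpp
      simp at hpp
    rw [hA, Solve_alt, if_pos hk]
  · have hk2 : 2 ≤ k := by omega
    rw [Solve_alt, if_neg hk]
    have hfold := foldB_eq k hk2 cs 1 le_rfl
    norm_num at hfold
    rw [hfold]
    rw [Bool.eq_iff_iff, Solve_iff, beq_iff_eq, pv_key k hk2 cs]
    constructor
    · intro h; rw [h]; omega
    · intro h; omega
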